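-- pv_equiv track=rewrite | github.com/michaelmech/Pluribass | data_gen.py | _passive_opps_count
-- ===== SOURCE A (Python) =====
-- from typing import List, Tuple, Dict, Any
-- from typing import List, Tuple, Dict, Any
-- from typing import Optional, Tuple, List, Dict
-- from typing import List, Dict
-- from typing import List, Tuple, Dict, Any
-- from typing import List, Tuple, Dict, Any, Optional
-- from typing import Optional, Tuple, List
--
-- def _passive_opps_count(live: set, past_actions: List[str], hero_tag: str) -> int:
--     opps = set(live) - {hero_tag}
--     raise_count = {p: 0 for p in opps}
--     for a in past_actions:
--         if a.startswith("p") and " cbr" in a: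
--             pid = a.split()[0]
--             if pid in raise_count:
--                 raise_count[pid] += 1
--     return sum(1 for v in raise_count.values() if v == 0)
-- ===== SOURCE B (Python) =====
-- from typing import List
--
--
-- def _passive_opps_count(live: set, past_actions: List[str], hero_tag: str) -> int:
--     def raised_by(p: str) -> bool:
--         return any(a.startswith("p") and " cbr" in a and a.split()[0] == p
--                    for a in past_actions)
--     return sum(1 for p in set(live) if p != hero_tag and not raised_by(p))
-- ===== Notes on version B (the rewrite author's own statement) =====
-- stated objective: alternative
-- what changed: Drops all accumulation state (the zero-initialized count dict and its final count-the-zeros scan): B does a brute-force per-opponent existence check, scanning past_actions with any() once for each distinct non-hero live player and summing the opponents with no matching raise action.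
import Mathlib
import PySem

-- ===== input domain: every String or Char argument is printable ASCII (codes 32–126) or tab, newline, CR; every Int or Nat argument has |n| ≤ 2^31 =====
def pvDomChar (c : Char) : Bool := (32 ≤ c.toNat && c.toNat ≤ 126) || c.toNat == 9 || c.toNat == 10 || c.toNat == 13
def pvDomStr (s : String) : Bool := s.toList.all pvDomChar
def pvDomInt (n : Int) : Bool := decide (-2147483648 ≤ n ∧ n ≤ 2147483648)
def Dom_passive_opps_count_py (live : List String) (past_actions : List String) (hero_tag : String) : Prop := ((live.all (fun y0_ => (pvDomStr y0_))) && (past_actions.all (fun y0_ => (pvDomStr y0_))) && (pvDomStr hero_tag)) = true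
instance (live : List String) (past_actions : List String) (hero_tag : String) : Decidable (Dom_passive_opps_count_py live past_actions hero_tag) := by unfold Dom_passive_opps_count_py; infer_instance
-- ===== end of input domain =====

-- B keeps no accumulation state at all: instead of A's zero-initialized count dict and its
-- final count-the-zeros scan, B checks each distinct non-hero live player with a per-player
-- any() scan of past_actions and sums the players with no matching raise (alternative).

-- ===== PORT A =====
def passive_opps_count_py (live : List String) (past_actions : List String) (hero_tag : String) : Int :=
  let opps : PySem.Set String := PySem.Set.diff (PySem.Set.ofList live) [hero_tag]
  let raise_count : PySem.Dict String Int :=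
    opps.foldl (fun d p => d.insert p 0) PySem.Dict.empty
  let raise_count := past_actions.foldl (fun d a =>
    if PySem.Str.startswith a "p" && PySem.Str.isIn " cbr" a then
      let pid := (PySem.Str.split₀ a).headD ""   -- a.split()[0]; exists since a starts with 'p'
      if d.contains pid then d.modify pid 0 (· + 1) else d
    else d) raise_count
  raise_count.values.foldl (fun acc v => if v == 0 then acc + 1 else acc) 0

-- ===== PORT B =====
def passive_opps_count_py_alt (live : List String) (past_actions : List String) (hero_tag : String) : Int :=
  let raised_by := fun (p : String) => past_actions.any (fun a =>
    PySem.Str.startswith a "p" && PySem.Str.isIn " cbr" a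
      && ((PySem.Str.split₀ a).headD "" == p))   -- a.split()[0]; exists since a starts with 'p'
  (PySem.Set.ofList live).foldl
    (fun acc p => if p != hero_tag && !(raised_by p) then acc + 1 else acc) 0

-- ===== PRECONDITION & SPEC =====
def Spec_passive_opps_count_py (live : List String) (past_actions : List String) (hero_tag : String) (out : Int) : Prop := out = passive_opps_count_py_alt live past_actions hero_tag
instance (live : List String) (past_actions : List String) (hero_tag : String) (out : Int) : Decidable (Spec_passive_opps_count_py live past_actions hero_tag out) := by unfold Spec_passive_opps_count_py; infer_instance

-- ===== CLAIM (what is proved, stated in full; the proofs are below) =====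
def Claim_equal_passive_opps_count_py : Prop := ∀ (live : List String) (past_actions : List String) (hero_tag : String), Dom_passive_opps_count_py live past_actions hero_tag → Spec_passive_opps_count_py live past_actions hero_tag (passive_opps_count_py live past_actions hero_tag)

-- ===== LEMMAS AND PROOFS =====

-- Characterisation of A's loop: with the dict's keys equal to opps, nonnegative counts
-- zero exactly on the opponents satisfying Q, A's final count-the-zeros over the dict
-- after processing t equals the number of opponents p with Q p and no raise by p in t.
lemma pv_loop_inv (opps : PySem.Set String) (hnd : opps.Nodup) :
    ∀ (t : List String) (d : PySem.Dict String Int) (Q : String → Bool),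
    d.keys = opps →
    (∀ p ∈ opps, 0 ≤ d.getD p 0) →
    (∀ p ∈ opps, (d.getD p 0 = 0 ↔ Q p = true)) →
    ((t.foldl (fun d a =>
        if PySem.Str.startswith a "p" && PySem.Str.isIn " cbr" a then
          let pid := (PySem.Str.split₀ a).headD ""
          if d.contains pid then d.modify pid 0 (· + 1) else d
        else d) d).values.foldl (fun acc v => if v == 0 then acc + 1 else acc) (0 : Int))
      = ((opps.filter (fun p => Q p && !(t.any (fun a =>
          PySem.Str.startswith a "p" && PySem.Str.isIn " cbr" a
            && ((PySem.Str.split₀ a).headD "" == p))))).length : Int) := by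
  intro t
  induction t with
  | nil =>
    intro d Q hkeys hnn hz
    simp only [List.foldl_nil, List.any_nil, Bool.not_false, Bool.and_true]
    have hknd : d.keys.Nodup := hkeys ▸ hnd
    rw [PySem.Dict.values_eq_map_keys d hknd 0, hkeys]
    rw [PySem.List.foldl_beq_add_one, zero_add]
    norm_cast
    rw [List.count_eq_countP, List.countP_map, ← List.countP_eq_length_filter]
    apply List.countP_congr
    intro p hp
    simp only [Function.comp, beq_iff_eq]
    constructor
    · intro h; exact (hz p hp).mp h
    · intro h; exact (hz p hp).mpr h
  | cons a t ih =>
    intro d Q hkeys hnn hz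
    simp only [List.foldl_cons]
    by_cases hg : (PySem.Str.startswith a "p" && PySem.Str.isIn " cbr" a) = true
    · simp only [hg, if_true]
      set pid := (PySem.Str.split₀ a).headD "" with hpid
      have hmem : d.contains pid = opps.contains pid := by
        by_cases h : pid ∈ opps
        · rw [(PySem.Dict.contains_iff_mem_keys d pid).mpr (hkeys ▸ h),
              (PySem.Set.contains_iff opps pid).mpr h]
        · have h1 : ¬ d.contains pid = true := fun hc =>
            h (hkeys ▸ (PySem.Dict.contains_iff_mem_keys d pid).mp hc)
          have h2 : ¬ PySem.Set.contains opps pid = true := fun hc =>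
            h ((PySem.Set.contains_iff opps pid).mp hc)
          rw [Bool.eq_false_iff.mpr h1, Bool.eq_false_iff.mpr h2]
      by_cases hc : opps.contains pid = true
      · have hpo : pid ∈ opps := (PySem.Set.contains_iff opps pid).mp hc
        rw [hmem, hc]
        simp only [if_true]
        rw [ih (d.modify pid 0 (· + 1)) (fun p => Q p && !(p == pid))
          (by rw [PySem.Dict.keys_modify,
                PySem.Dict.keys_insert_of_contains _ _ ((PySem.Dict.contains_iff_mem_keys d pid).mpr (hkeys ▸ hpo))]
              exact hkeys)
          (by intro p hp
              rw [PySem.Dict.getD_modify]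
              by_cases hpp : p = pid
              · simp only [hpp, if_true]
                have := hnn pid hpo; omega
              · simp only [hpp, if_false]; exact hnn p hp)
          (by intro p hp
              rw [PySem.Dict.getD_modify]
              by_cases hpp : p = pid
              · simp only [hpp, if_true]
                constructor
                · intro h; exact absurd h (by have := hnn pid hpo; omega)
                · intro h; simp at h
              · simp only [hpp, if_false]
                rw [hz p hp]
                simp [hpp])]
        have h12 := hg
        rw [Bool.and_eq_true] at h12
        obtain ⟨h1, h2⟩ := h12
        have hpe : ((PySem.Str.split₀ a).headD "" == pid) = true := by
          rw [← hpid]; simp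
        congr 2
        apply List.filter_congr
        intro p _
        by_cases hpp : p = pid
        · subst hpp
          simp only [List.any_cons, h1, h2, hpe]
          simp
        · have hne : ((PySem.Str.split₀ a).headD "" == p) = false :=
            beq_eq_false_iff_ne.mpr (fun h => hpp ((hpid.trans h).symm))
          have hppb : (p == pid) = false := beq_eq_false_iff_ne.mpr hpp
          simp only [List.any_cons, hne, hppb]
          simp
      · have hc' : opps.contains pid = false := Bool.eq_false_iff.mpr hc
        rw [hmem, hc']
        simp only [Bool.false_eq_true, if_false]
        rw [ih d Q hkeys hnn hz]
        congr 2
        apply List.filter_congr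
        intro p hp
        have hne : ((PySem.Str.split₀ a).headD "" == p) = false := by
          refine beq_eq_false_iff_ne.mpr (fun h => ?_)
          exact hc ((PySem.Set.contains_iff opps pid).mpr (by rw [hpid, h]; exact hp))
        simp only [List.any_cons, hne]
        simp
    · simp only [Bool.not_eq_true] at hg
      simp only [hg, Bool.false_eq_true, if_false]
      rw [ih d Q hkeys hnn hz]
      congr 2
      apply List.filter_congr
      intro p _
      by_cases hs : PySem.Str.startswith a "p" = true
      · have hi : PySem.Str.isIn " cbr" a = false := by
          cases hI : PySem.Str.isIn " cbr" a
          · rfl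
          · rw [hs, hI] at hg; simp at hg
        simp only [List.any_cons, hi]
        simp
      · have hs' : PySem.Str.startswith a "p" = false := Bool.eq_false_iff.mpr hs
        simp only [List.any_cons, hs']
        simp

-- The initial dict {p: 0 for p in opps} has keys = opps and all values 0.
lemma pv_init_keys (opps : PySem.Set String) (hnd : opps.Nodup) :
    (opps.foldl (fun d p => d.insert p 0) (PySem.Dict.empty : PySem.Dict String Int)).keys = opps := by
  have := PySem.Dict.keys_foldl_insert (κ := String) (ν := Int) opps (fun _ _ => 0) PySem.Dict.empty
  simp only [PySem.Dict.keys_empty] at this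
  rw [this, PySem.Set.update_nil_left, PySem.Set.ofList_eq_self_of_nodup _ hnd]

lemma pv_init_getD (opps : PySem.Set String) :
    ∀ p ∈ opps, (opps.foldl (fun d p => d.insert p 0) (PySem.Dict.empty : PySem.Dict String Int)).getD p 0 = 0 := by
  suffices h : ∀ (l : List String) (d : PySem.Dict String Int) (p : String),
      (d.getD p 0 = 0 ∨ p ∈ l) → (l.foldl (fun d p => d.insert p 0) d).getD p 0 = 0 by
    intro p hp
    exact h opps PySem.Dict.empty p (Or.inr hp)
  intro l
  induction l with
  | nil => intro d p h; simpa using h.resolve_right (by simp)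
  | cons x xs ih =>
    intro d p h
    simp only [List.foldl_cons]
    apply ih
    by_cases hpx : p = x
    · left; subst hpx; rw [PySem.Dict.getD_insert_self]
    · rcases h with h | h
      · left; rwa [PySem.Dict.getD_insert_of_ne _ _ _ (fun h' => hpx h')]
      · rcases List.mem_cons.mp h with h | h
        · exact absurd h hpx
        · right; exact h

-- B's counting fold is the length of the filtered list.
lemma pv_foldl_if_count (c : String → Bool) :
    ∀ (l : List String) (n : Int),
    l.foldl (fun acc p => if c p then acc + 1 else acc) n = n + ((l.filter c).length : Int) := by
  intro l
  induction l with
  | nil => intro n; simp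
  | cons x xs ih =>
    intro n
    by_cases hx : c x = true <;> simp [List.foldl_cons, hx, ih] <;> push_cast <;> ring

-- ===== VERDICT (by name: the statement is the Claim_ definition above) =====
theorem passive_opps_count_py_spec : Claim_equal_passive_opps_count_py := by
  intro live past_actions hero_tag _
  unfold Spec_passive_opps_count_py passive_opps_count_py passive_opps_count_py_alt
  have hnd : (PySem.Set.diff (PySem.Set.ofList live) [hero_tag]).Nodup :=
    PySem.Set.nodup_diff _ _ (PySem.Set.nodup_ofList live)
  rw [pv_loop_inv _ hnd past_actions _ (fun _ => true)
    (pv_init_keys _ hnd)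
    (fun p hp => le_of_eq (pv_init_getD _ p hp).symm)
    (fun p hp => by simp [pv_init_getD _ p hp])]
  rw [pv_foldl_if_count]
  simp only [zero_add]
  congr 2
  simp only [PySem.Set.diff, List.filter_filter]
  apply List.filter_congr
  intro p _
  simp [bne, Bool.and_comm, beq_eq_decide]
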